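-- pv_equiv track=rewrite | github.com/ZabakJL/ProyectoMiniMarket | scr/loadAndTransformData.py | generar_etiquetas_consecutivas
-- ===== SOURCE A (Python) =====
-- import string
--
-- def generar_etiquetas_consecutivas(n):
--     """
--     Genera etiquetas consecutivas en el formato A, B, ..., Z, A1, B1, ..., Z1, A2, B2, ..., etc.
--
--     :param n: Número total de etiquetas a generar.
--     :return: Lista de etiquetas.
--     """
--     etiquetas = []
--     letras = list(string.ascii_uppercase)
--
--     for i in range(n):
--         if i < 26:
--             etiquetas.append(letras[i])
--         else:
--             ciclo = i // 26
--             indice = i % 26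
--             etiquetas.append(f"{letras[indice]}{ciclo}")
--
--     return etiquetas
-- ===== SOURCE B (Python) =====
-- import string
--
-- def generar_etiquetas_consecutivas(n):
--     """
--     Genera etiquetas consecutivas A, B, ..., Z, A1, B1, ..., bloque a bloque:
--     un bucle externo por ciclo y uno interno sobre las letras del bloque.
--     """
--     etiquetas = []
--     ciclo = 0
--     faltan = n
--     while faltan > 0:
--         for letra in string.ascii_uppercase[:faltan]:
--             etiquetas.append(letra if ciclo == 0 else f"{letra}{ciclo}")
--         faltan -= 26
--         ciclo += 1
--     return etiquetas
-- ===== Notes on version B (the rewrite author's own statement) =====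
-- stated objective: alternative
-- what changed: Replaces the single flat loop that recomputes the cycle number and letter index by division and modulo for every element with block-by-block generation: an outer loop over cycles and an inner loop over the sliced alphabet, so no per-element division is performed.
import Mathlib
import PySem

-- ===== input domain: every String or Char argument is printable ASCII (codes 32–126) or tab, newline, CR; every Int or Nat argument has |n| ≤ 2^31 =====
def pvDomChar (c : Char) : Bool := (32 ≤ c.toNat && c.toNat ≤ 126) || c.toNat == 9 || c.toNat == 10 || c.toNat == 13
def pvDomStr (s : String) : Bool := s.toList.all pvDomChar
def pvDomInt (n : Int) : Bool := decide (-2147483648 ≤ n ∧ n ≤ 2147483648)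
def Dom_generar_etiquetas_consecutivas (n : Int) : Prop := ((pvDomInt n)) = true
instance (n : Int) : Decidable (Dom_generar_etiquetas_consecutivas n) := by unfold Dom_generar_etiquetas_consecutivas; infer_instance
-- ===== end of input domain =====

-- B generates the labels block-by-block (outer loop over cycles, inner loop over the
-- sliced alphabet) instead of A's flat loop computing i//26 and i%26 per element;
-- objective: alternative decomposition, same result.

-- ===== PORT A =====
-- letras = list(string.ascii_uppercase)
def letras : List String := ["A", "B", "C", "D", "E", "F", "G", "H", "I", "J", "K", "L", "M", "N", "O", "P", "Q", "R", "S", "T", "U", "V", "W", "X", "Y", "Z"]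

-- 'letras[i]' / 'letras[indice]': indices are always in range (0 ≤ i < 26 resp. i % 26),
-- so the total pyGetD form is exact here.
def generar_etiquetas_consecutivas (n : Int) : List String :=
  (PySem.List.pyRange 0 n 1).foldl
    (fun etiquetas i =>
      etiquetas ++
        [if i < 26 then PySem.List.pyGetD letras i ""
         else PySem.List.pyGetD letras (PySem.Int.mod i 26) "" ++
              PySem.Int.toStr (PySem.Int.floordiv i 26)])
    []

-- ===== PORT B =====
-- while faltan > 0: for letra in string.ascii_uppercase[:faltan]: append …; faltan -= 26; ciclo += 1
def bloqueLoop (faltan : Int) (ciclo : Nat) : List String :=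
  if faltan ≤ 0 then []
  else
    (PySem.List.slice letras none (some faltan)).map
      (fun letra => if ciclo = 0 then letra else letra ++ PySem.Int.toStr (ciclo : Int))
    ++ bloqueLoop (faltan - 26) (ciclo + 1)
termination_by faltan.toNat
decreasing_by omega

def generar_etiquetas_consecutivas_alt (n : Int) : List String :=
  bloqueLoop n 0

-- ===== PRECONDITION & SPEC =====
def Spec_generar_etiquetas_consecutivas (n : Int) (out : List String) : Prop := out = generar_etiquetas_consecutivas_alt n
instance (n : Int) (out : List String) : Decidable (Spec_generar_etiquetas_consecutivas n out) := by unfold Spec_generar_etiquetas_consecutivas; infer_instance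

-- ===== CLAIM (what is proved, stated in full; the proofs are below) =====
def Claim_equal_generar_etiquetas_consecutivas : Prop := ∀ (n : Int), Dom_generar_etiquetas_consecutivas n → Spec_generar_etiquetas_consecutivas n (generar_etiquetas_consecutivas n)

-- ===== LEMMAS AND PROOFS =====

-- the label A's loop body produces for index i
def labA (i : Int) : String :=
  if i < 26 then PySem.List.pyGetD letras i ""
  else PySem.List.pyGetD letras (PySem.Int.mod i 26) "" ++
       PySem.Int.toStr (PySem.Int.floordiv i 26)

lemma letras_length : letras.length = 26 := by decide

-- B's block element for letter k of cycle c is exactly A's label for flat index 26*c+k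
lemma block_elem_eq_labA (c k : Nat) (hk : k < 26) :
    (if c = 0 then letras.getD k "" else letras.getD k "" ++ PySem.Int.toStr (c : Int))
      = labA ((26 * c + k : Nat) : Int) := by
  unfold labA
  by_cases hc : c = 0
  · subst hc
    have e : ((26 * 0 + k : Nat) : Int) = (k : Int) := by push_cast; ring
    rw [if_pos rfl, e, if_pos (by exact_mod_cast hk), PySem.List.pyGetD_natCast]
  · have h26 : ¬ (((26 * c + k : Nat) : Int) < 26) := by
      have : 0 < c := Nat.pos_of_ne_zero hc
      omega
    have hm : (26 * c + k) % 26 = k := by omega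
    have hd : (26 * c + k) / 26 = c := by omega
    have hmod : PySem.Int.mod ((26 * c + k : Nat) : Int) 26 = (k : Int) := by
      have := PySem.Int.mod_natCast (26 * c + k) 26
      simpa [hm] using this
    have hdiv : PySem.Int.floordiv ((26 * c + k : Nat) : Int) 26 = (c : Int) := by
      have := PySem.Int.floordiv_natCast (26 * c + k) 26
      simpa [hd] using this
    rw [if_neg hc, if_neg h26, hmod, hdiv, PySem.List.pyGetD_natCast]

-- taking a prefix and mapping = mapping the label function over the index range
lemma take_map_eq_range (f : String → String) (m : Nat) (hm : m ≤ 26) :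
    (letras.take m).map f = (List.range m).map (fun k => f (letras.getD k "")) := by
  apply List.ext_getElem
  · simp [letras_length]; omega
  · intro i h1 h2
    have hi : i < m := by simp [letras_length] at h1; omega
    have hi26 : i < letras.length := by rw [letras_length]; omega
    simp [List.getD_eq_getElem?_getD, List.getElem?_eq_getElem hi26]

set_option maxHeartbeats 800000 in
lemma bloqueLoop_eq (m : Nat) : ∀ (faltan : Int) (c : Nat), faltan.toNat = m →
    bloqueLoop faltan c
      = (List.range m).map (fun k => labA ((26 * c + k : Nat) : Int)) := by
  induction m using Nat.strong_induction_on with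
  | _ m ih =>
    intro faltan c hm
    rw [bloqueLoop]
    by_cases h0 : faltan ≤ 0
    · have hz : m = 0 := by omega
      rw [if_pos h0, hz]
      simp
    · rw [if_neg h0]
      have hms : (0:Int) ≤ faltan := by omega
      rw [PySem.List.slice_to _ hms, hm]
      by_cases hle : m ≤ 26
      · have hrec : bloqueLoop (faltan - 26) (c + 1) = [] := by
          rw [bloqueLoop, if_pos (by omega)]
        rw [hrec, List.append_nil, take_map_eq_range _ m hle]
        exact List.map_congr_left (fun k hk =>
          block_elem_eq_labA c k (by have := List.mem_range.mp hk; omega))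
      · have htail : (faltan - 26).toNat = m - 26 := by omega
        rw [ih (m - 26) (by omega) (faltan - 26) (c + 1) htail]
        have hall : letras.take m = letras.take 26 := by
          rw [List.take_of_length_le (by rw [letras_length]; omega),
              List.take_of_length_le (by rw [letras_length])]
        have part1 : (letras.take m).map
              (fun letra => if c = 0 then letra else letra ++ PySem.Int.toStr (c : Int))
            = (List.range 26).map (fun k => labA ((26 * c + k : Nat) : Int)) := by
          rw [hall, take_map_eq_range _ 26 le_rfl]
          exact List.map_congr_left (fun k hk =>
            block_elem_eq_labA c k (List.mem_range.mp hk))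
        have part2 : (List.range (m - 26)).map (fun k => labA ((26 * (c + 1) + k : Nat) : Int))
            = ((List.range (m - 26)).map (fun k => 26 + k)).map
                (fun k => labA ((26 * c + k : Nat) : Int)) := by
          rw [List.map_map]
          exact List.map_congr_left (fun k _ => by
            have : 26 * (c + 1) + k = 26 * c + (26 + k) := by ring
            simp [Function.comp, this])
        have hsplit : List.range m = List.range 26 ++ (List.range (m - 26)).map (fun k => 26 + k) := by
          have hm' : m = 26 + (m - 26) := by omega
          rw [hm', List.range_add]
          simp
        rw [part1, part2, hsplit, List.map_append]

lemma portA_eq (n : Int) :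
    generar_etiquetas_consecutivas n
      = (List.range n.toNat).map (fun k => labA ((k : Nat) : Int)) := by
  unfold generar_etiquetas_consecutivas
  rw [PySem.List.foldl_append_singleton_eq_map, List.nil_append,
      PySem.List.pyRange_one, List.map_map]
  simp [Function.comp, labA]

-- ===== VERDICT (by name: the statement is the Claim_ definition above) =====
theorem generar_etiquetas_consecutivas_spec : Claim_equal_generar_etiquetas_consecutivas := by
  intro n _
  unfold Spec_generar_etiquetas_consecutivas generar_etiquetas_consecutivas_alt
  rw [portA_eq, bloqueLoop_eq n.toNat n 0 rfl]
  exact List.map_congr_left (fun k _ => by norm_num)
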